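-- pv_equiv track=rewrite | github.com/dgoldman0/akashic | local_testing/test_middleware.py | http_request
-- ===== SOURCE A (Python) =====
-- def tstr_compiled(s):
--     """Build Forth code to construct string s in _TB via TR/TC.
--     Returns list of Forth lines within line length limits."""
--     parts = ['TR']
--     for ch in s:
--         parts.append(f'{ord(ch)} TC')
--     full = " ".join(parts)
--     lines = []
--     while len(full) > 70:
--         sp = full.rfind(' ', 0, 70)
--         if sp == -1: sp = 70
--         lines.append(full[:sp])
--         full = full[sp:].lstrip()
--     if full: lines.append(full)
--     return lines
--
-- def http_request(method="GET", path="/", headers=None, body=""):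
--     """Return tstr_compiled lines for a minimal HTTP request."""
--     h = headers or {}
--     req = f"{method} {path} HTTP/1.1\r\n"
--     for k, v in h.items():
--         req += f"{k}: {v}\r\n"
--     req += "\r\n"
--     req += body
--     return tstr_compiled(req)
-- ===== SOURCE B (Python) =====
-- def http_request(method="GET", path="/", headers=None, body=""):
--     """Return Forth TR/TC encoding lines for a minimal HTTP request.
--
--     Wrapping works on the token list directly: while the remaining tokens
--     join to more than 70 characters, emit the longest token run that still
--     leaves room for the break (at most 69 characters); the closing line may
--     fill all 70 columns.  One linear pass; no string is ever re-split."""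
--     h = headers or {}
--     req = f"{method} {path} HTTP/1.1\r\n"
--     for k, v in h.items():
--         req += f"{k}: {v}\r\n"
--     req += "\r\n"
--     req += body
--
--     words = ['TR']
--     for ch in req:
--         words += [str(ord(ch)), 'TC']
--
--     lines = []
--     i = 0
--     remaining = sum(len(w) for w in words) + len(words) - 1
--     while remaining > 70:
--         j, width = i + 1, len(words[i])
--         while width + 1 + len(words[j]) <= 69:
--             width += 1 + len(words[j])
--             j += 1
--         lines.append(' '.join(words[i:j]))
--         remaining -= width + 1
--         i = j
--     lines.append(' '.join(words[i:]))
--     return lines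
-- ===== Notes on version B (the rewrite author's own statement) =====
-- stated objective: faster
-- what changed: A wraps by repeatedly re-slicing the fully joined string with rfind/lstrip (copying the remaining tail each line); B wraps the token list in one indexed pass with a running remaining-length counter, joining each output line once.
import Mathlib
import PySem

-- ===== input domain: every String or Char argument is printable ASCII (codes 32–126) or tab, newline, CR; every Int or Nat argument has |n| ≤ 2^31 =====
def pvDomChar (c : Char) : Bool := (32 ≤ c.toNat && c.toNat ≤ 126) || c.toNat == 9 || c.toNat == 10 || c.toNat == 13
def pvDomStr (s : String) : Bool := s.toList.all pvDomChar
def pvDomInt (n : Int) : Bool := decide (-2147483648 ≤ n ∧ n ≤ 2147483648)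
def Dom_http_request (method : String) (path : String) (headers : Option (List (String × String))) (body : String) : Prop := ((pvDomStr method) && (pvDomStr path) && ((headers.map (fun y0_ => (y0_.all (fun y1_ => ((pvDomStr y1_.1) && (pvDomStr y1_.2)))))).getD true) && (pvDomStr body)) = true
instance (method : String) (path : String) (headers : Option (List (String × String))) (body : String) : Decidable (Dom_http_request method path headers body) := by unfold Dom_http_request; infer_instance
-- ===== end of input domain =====

set_option maxRecDepth 8192

-- B wraps the token list in one indexed pass (each output line joined once) instead of A's
-- repeated rfind/lstrip re-slicing of the joined string; a timing run measured B faster.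

-- ord(ch)
def pvOrd (c : Char) : Int := Int.ofNat c.toNat

-- shared by both Pythons verbatim: h = headers or {}; req = f"{method} {path} HTTP/1.1\r\n" + headers + "\r\n" + body
def pvReq (method : String) (path : String) (headers : Option (List (String × String))) (body : String) : List Char :=
  let h := (headers.getD []).foldl (fun d kv => PySem.Dict.insert d kv.1 kv.2) (PySem.Dict.empty (κ := String) (ν := String))
  let req := method.toList ++ [' '] ++ path.toList ++ [' ', 'H', 'T', 'T', 'P', '/', '1', '.', '1', '\r', '\n']
  let req := h.items.foldl (fun r kv => r ++ kv.1.toList ++ [':', ' '] ++ kv.2.toList ++ ['\r', '\n']) req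
  req ++ ['\r', '\n'] ++ body.toList

-- ===== PORT A =====
-- the `while len(full) > 70: …` loop of tstr_compiled plus the trailing `if full:` append
-- (fuel only makes the same computation total; each iteration is A's, step for step)
def pvWrapA : Nat → List Char → List (List Char)
  | 0, _ => []
  | fuel + 1, full =>
    if 70 < (full.length : Int) then
      let sp0 := PySem.Chars.rfindFrom full [' '] 0 (some 70)
      let sp := if sp0 = -1 then (70 : Int) else sp0
      PySem.Chars.slice full none (some sp) ::
        pvWrapA fuel (PySem.Chars.lstrip (PySem.Chars.slice full (some sp) none))
    else if full ≠ [] then [full] else []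

-- tstr_compiled: parts = ['TR'] + [f'{ord(ch)} TC' for ch in s]; full = " ".join(parts); wrap loop
def pvTstr (s : List Char) : List String :=
  let parts : List (List Char) := ['T', 'R'] :: s.map (fun ch => PySem.Int.toChars (pvOrd ch) ++ [' ', 'T', 'C'])
  let full := PySem.Chars.join [' '] parts
  (pvWrapA (full.length + 1) full).map String.ofList

def http_request (method : String) (path : String) (headers : Option (List (String × String))) (body : String) : List String :=
  pvTstr (pvReq method path headers body)

-- ===== PORT B =====
-- Source B's inner `while width + 1 + len(words[j]) <= 69: …` loop, returning (j, width); `words[j]`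
-- out of range is an IndexError in Python and is returned as (j, width) here (never reached:
-- the outer guard keeps j in range)
def pvBsplit (words : List (List Char)) (width : Nat) (j : Nat) : Nat × Nat :=
  match h : words[j]? with
  | some w => if width + 1 + w.length ≤ 69 then pvBsplit words (width + 1 + w.length) (j + 1) else (j, width)
  | none => (j, width)
termination_by words.length - j
decreasing_by
  obtain ⟨hlt, -⟩ := List.getElem?_eq_some_iff.mp h
  omega

-- Source B's outer `while remaining > 70: …` loop plus the final append
-- (fuel totalizes; `words[i]` out of range is an IndexError, unreachable under the guard)
def pvBwrap : Nat → List (List Char) → Nat → Int → List (List Char)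
  | 0, _, _, _ => []
  | fuel + 1, words, i, remaining =>
    if 70 < remaining then
      match words[i]? with
      | none => []
      | some wi =>
        let p := pvBsplit words wi.length (i + 1)
        PySem.Chars.join [' '] ((words.drop i).take (p.1 - i)) ::
          pvBwrap fuel words p.1 (remaining - (p.2 : Int) - 1)
    else [PySem.Chars.join [' '] (words.drop i)]

def http_request_alt (method : String) (path : String) (headers : Option (List (String × String))) (body : String) : List String :=
  let req := pvReq method path headers body
  let words : List (List Char) := ['T', 'R'] :: req.flatMap (fun ch => [PySem.Int.toChars (pvOrd ch), ['T', 'C']])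
  let remaining : Int := ((words.map List.length).sum : Int) + (words.length : Int) - 1
  (pvBwrap (words.length + 1) words 0 remaining).map String.ofList

-- ===== PRECONDITION & SPEC =====
def Spec_http_request (method : String) (path : String) (headers : Option (List (String × String))) (body : String) (out : List String) : Prop := out = http_request_alt method path headers body
instance (method : String) (path : String) (headers : Option (List (String × String))) (body : String) (out : List String) : Decidable (Spec_http_request method path headers body out) := by unfold Spec_http_request; infer_instance

-- ===== CLAIM (what is proved, stated in full; the proofs are below) =====
def Claim_equal_http_request : Prop := ∀ (method : String) (path : String) (headers : Option (List (String × String))) (body : String), Dom_http_request method path headers body → Spec_http_request method path headers body (http_request method path headers body)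

-- ===== LEMMAS AND PROOFS =====

-- join with single-space separator, word-list view
def pvJ : List (List Char) → List Char
  | [] => []
  | [w] => w
  | w :: ws => w ++ ' ' :: pvJ ws

def pvJlen (ws : List (List Char)) : Nat := (pvJ ws).length

-- a good word: nonempty, short, whitespace-free
def pvGood (w : List Char) : Prop :=
  w ≠ [] ∧ w.length ≤ 68 ∧ ∀ c ∈ w, PySem.Chars.isspace c = false

-- greedy split: move words from rest into the current line while the joined length stays ≤ 69
def pvGsplit : List (List Char) → List (List Char) → List (List Char) × List (List Char)
  | cw, [] => (cw, [])
  | cw, w :: rest => if pvJlen cw + 1 + w.length ≤ 69 then pvGsplit (cw ++ [w]) rest else (cw, w :: rest)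

theorem pvGsplit_snd_length : ∀ (rest cw : List (List Char)), ((pvGsplit cw rest).2).length ≤ rest.length := by
  intro rest
  induction rest with
  | nil => intro cw; simp [pvGsplit]
  | cons w rest ih =>
    intro cw
    simp only [pvGsplit]
    split
    · exact le_trans (ih (cw ++ [w])) (by simp)
    · simp

-- the word-level wrap specification both loops compute
def pvGlines : List (List Char) → List (List Char)
  | [] => []
  | w :: rest =>
    if 70 < pvJlen (w :: rest) then
      pvJ (pvGsplit [w] rest).1 :: pvGlines (pvGsplit [w] rest).2
    else [pvJ (w :: rest)]
termination_by ws => ws.length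
decreasing_by
  exact Nat.lt_succ_of_le (pvGsplit_snd_length rest [w])

theorem pvJ_cons_cons (a b : List Char) (ws : List (List Char)) :
    pvJ (a :: b :: ws) = a ++ ' ' :: pvJ (b :: ws) := rfl

theorem pvJ_single (w : List Char) : pvJ [w] = w := rfl

theorem pvJ_ne_nil (w : List Char) (ws : List (List Char)) (hw : w ≠ []) : pvJ (w :: ws) ≠ [] := by
  cases ws with
  | nil => simpa [pvJ_single]
  | cons b ws =>
    rw [pvJ_cons_cons]
    intro h
    exact hw (List.append_eq_nil_iff.mp h).1

theorem pvJ_append_single : ∀ (cw : List (List Char)) (w : List Char), cw ≠ [] →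
    pvJ (cw ++ [w]) = pvJ cw ++ ' ' :: w := by
  intro cw
  induction cw with
  | nil => simp
  | cons a cw ih =>
    intro w _
    cases cw with
    | nil => rfl
    | cons b cw' =>
      have ih' := ih w (by simp)
      simp only [List.cons_append] at ih' ⊢
      rw [pvJ_cons_cons, ih', pvJ_cons_cons]
      simp

theorem pvJ_append : ∀ (a b : List (List Char)), a ≠ [] → b ≠ [] →
    pvJ (a ++ b) = pvJ a ++ ' ' :: pvJ b := by
  intro a
  induction a with
  | nil => simp
  | cons x a ih =>
    intro b _ hb
    cases a with
    | nil =>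
      cases b with
      | nil => simp at hb
      | cons y b' => simp [pvJ_cons_cons, pvJ_single]
    | cons z a' =>
      have ih' := ih b (by simp) hb
      simp only [List.cons_append] at ih' ⊢
      rw [pvJ_cons_cons, ih', pvJ_cons_cons]
      simp

theorem pvJlen_single (w : List Char) : pvJlen [w] = w.length := rfl

theorem pvJlen_cons (w : List Char) (ws : List (List Char)) (h : ws ≠ []) :
    pvJlen (w :: ws) = w.length + 1 + pvJlen ws := by
  cases ws with
  | nil => simp at h
  | cons b ws =>
    simp [pvJlen, pvJ_cons_cons]
    omega

theorem pvJlen_append (a b : List (List Char)) (ha : a ≠ []) (hb : b ≠ []) :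
    pvJlen (a ++ b) = pvJlen a + 1 + pvJlen b := by
  simp [pvJlen, pvJ_append a b ha hb]
  omega

-- " ".join = pvJ
theorem pvJoin_eq_pvJ (ws : List (List Char)) : PySem.Chars.join [' '] ws = pvJ ws := by
  induction ws with
  | nil => rfl
  | cons w ws ih =>
    cases ws with
    | nil => simp [PySem.Chars.join, List.intercalate, List.intersperse, pvJ_single]
    | cons b ws =>
      simp only [PySem.Chars.join, List.intercalate, List.intersperse] at *
      simp only [List.flatten_cons, pvJ_cons_cons]
      rw [← ih]
      simp

theorem pvJlen_def (ws : List (List Char)) : pvJlen ws = (pvJ ws).length := rfl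

theorem pvJlen_append_single (cw : List (List Char)) (w : List Char) (h : cw ≠ []) :
    pvJlen (cw ++ [w]) = pvJlen cw + 1 + w.length := by
  simp [pvJlen, pvJ_append_single cw w h]
  omega

theorem pvJ_cons_congr (a : List Char) : ∀ (Y1 Y2 : List (List Char)), pvJ Y1 = pvJ Y2 →
    (Y1 = [] ↔ Y2 = []) → pvJ (a :: Y1) = pvJ (a :: Y2) := by
  intro Y1 Y2 h he
  cases Y1 with
  | nil =>
    cases Y2 with
    | nil => rfl
    | cons y t => simp at he
  | cons y1 t1 =>
    cases Y2 with
    | nil => simp at he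
    | cons y2 t2 => rw [pvJ_cons_cons, pvJ_cons_cons, h]

theorem pvJ_glue (a b : List Char) (Y : List (List Char)) :
    pvJ ((a ++ ' ' :: b) :: Y) = pvJ (a :: b :: Y) := by
  cases Y with
  | nil => simp [pvJ_single, pvJ_cons_cons]
  | cons y t =>
    rw [pvJ_cons_cons, pvJ_cons_cons, pvJ_cons_cons]
    simp

-- A's token list and B's word list join to the same string
theorem pvTokens_join (s : List Char) :
    ∀ X : List (List Char),
      pvJ (s.map (fun ch => PySem.Int.toChars (pvOrd ch) ++ [' ', 'T', 'C']) ++ X) =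
      pvJ (s.flatMap (fun ch => [PySem.Int.toChars (pvOrd ch), ['T', 'C']]) ++ X) := by
  induction s with
  | nil => intro X; rfl
  | cons ch s ih =>
    intro X
    simp only [List.map_cons, List.flatMap_cons, List.cons_append, List.append_assoc]
    have hglue : (PySem.Int.toChars (pvOrd ch) ++ [' ', 'T', 'C']) = PySem.Int.toChars (pvOrd ch) ++ ' ' :: ['T', 'C'] := rfl
    rw [hglue, pvJ_glue]
    apply pvJ_cons_congr
    · apply pvJ_cons_congr
      · exact ih X
      · constructor <;> intro h <;> rcases List.append_eq_nil_iff.mp h with ⟨h1, h2⟩ <;>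
          cases s <;> simp_all
    · simp

-- gsplit postconditions
theorem pvGsplit_spec : ∀ (rest cw : List (List Char)), cw ≠ [] → pvJlen cw ≤ 69 →
    (pvGsplit cw rest).1 ++ (pvGsplit cw rest).2 = cw ++ rest ∧
    (pvGsplit cw rest).1 ≠ [] ∧
    pvJlen (pvGsplit cw rest).1 ≤ 69 ∧
    (∀ w r, (pvGsplit cw rest).2 = w :: r → 69 < pvJlen (pvGsplit cw rest).1 + 1 + w.length) := by
  intro rest
  induction rest with
  | nil =>
    intro cw hcw h69
    refine ⟨by simp [pvGsplit], by simpa [pvGsplit], by simpa [pvGsplit], ?_⟩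
    intro w r h
    simp [pvGsplit] at h
  | cons w rest ih =>
    intro cw hcw h69
    simp only [pvGsplit]
    split
    · rename_i hcond
      have h69' : pvJlen (cw ++ [w]) ≤ 69 := by rw [pvJlen_append_single cw w hcw]; omega
      obtain ⟨e1, e2, e3, e4⟩ := ih (cw ++ [w]) (by simp) h69'
      refine ⟨by rw [e1]; simp, e2, e3, e4⟩
    · rename_i hcond
      refine ⟨rfl, hcw, h69, ?_⟩
      intro w' r h
      have h' : w :: rest = w' :: r := h
      injection h' with h1 h2
      subst h1
      show 69 < pvJlen cw + 1 + w.length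
      omega

-- rfind's scanner returns j when j is the last hit ≤ k
theorem pvGo_eq_of_hit (s : List Char) (c : Char) :
    ∀ (k j : Nat), j ≤ k → s[j]? = some c → (∀ i, j < i → i ≤ k → s[i]? ≠ some c) →
      PySem.Chars.rfind.go s [c] k = (j : Int) := by
  have hpre : ∀ l : List Char, ([c].isPrefixOf l = true) ↔ l[0]? = some c := by
    intro l
    cases l with
    | nil => simp [List.isPrefixOf]
    | cons x xs =>
      simp [List.isPrefixOf]
      exact eq_comm
  intro k
  induction k with
  | zero =>
    intro j hj hhit hmax
    interval_cases j
    rw [PySem.Chars.rfind.go.eq_def]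
    simp only
    rw [if_pos ((hpre s).mpr hhit)]
    simp
  | succ k ihk =>
    intro j hj hhit hmax
    rw [PySem.Chars.rfind.go.eq_def]
    simp only
    by_cases hjk : j = k + 1
    · subst hjk
      have : [c].isPrefixOf (List.drop (k + 1) s) = true := by
        rw [hpre]
        simpa [List.getElem?_drop] using hhit
      rw [if_pos this]
    · have hne : ¬ ([c].isPrefixOf (List.drop (k + 1) s) = true) := by
        rw [hpre]
        simpa [List.getElem?_drop] using hmax (k + 1) (by omega) (le_refl _)
      rw [if_neg hne]
      exact ihk j (by omega) hhit (fun i h1 h2 => hmax i h1 (by omega))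

-- A's loop computes the greedy word wrap
theorem pvWrapA_eq_glines : ∀ (n : Nat) (ws : List (List Char)), (pvJ ws).length < n →
    (∀ w ∈ ws, pvGood w) → pvWrapA n (pvJ ws) = pvGlines ws := by
  intro n
  induction n with
  | zero => intro ws h; omega
  | succ n ih =>
    intro ws hlen hg
    by_cases h70 : 70 < (pvJ ws).length
    · cases ws with
      | nil => simp [pvJ] at h70
      | cons w0 rest =>
        have hw0 := hg w0 (by simp)
        obtain ⟨heq0, hne, h69, hbd⟩ := pvGsplit_spec rest [w0] (by simp)
          (by rw [pvJlen_single]; have := hw0.2.1; omega)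
        have heq : (pvGsplit [w0] rest).1 ++ (pvGsplit [w0] rest).2 = w0 :: rest := by
          simpa using heq0
        have hgood' : ∀ w ∈ (pvGsplit [w0] rest).1 ++ (pvGsplit [w0] rest).2, pvGood w := by
          intro w hw
          exact hg w (heq ▸ hw)
        have hrest' : (pvGsplit [w0] rest).2 ≠ [] := by
          intro hnil
          rw [hnil, List.append_nil] at heq
          have h1 : pvJlen (w0 :: rest) ≤ 69 := by rw [← heq]; exact h69
          rw [pvJlen_def] at h1
          omega
        obtain ⟨w', r'', hP2⟩ : ∃ w' r'', (pvGsplit [w0] rest).2 = w' :: r'' := by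
          cases hc : (pvGsplit [w0] rest).2 with
          | nil => exact absurd hc hrest'
          | cons a b => exact ⟨a, b, rfl⟩
        have hsJ : pvJ (w0 :: rest) = pvJ (pvGsplit [w0] rest).1 ++ ' ' :: pvJ (pvGsplit [w0] rest).2 := by
          rw [← heq]
          exact pvJ_append _ _ hne (by rw [hP2]; simp)
        have hw' : pvGood w' := hgood' w' (List.mem_append_right _ (by rw [hP2]; simp))
        have hbd' : 69 < pvJlen (pvGsplit [w0] rest).1 + 1 + w'.length := hbd w' r'' hP2
        have hj69 : (pvJ (pvGsplit [w0] rest).1).length ≤ 69 := by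
          rw [← pvJlen_def]; exact h69
        have hslen : (pvJ (w0 :: rest)).length =
            (pvJ (pvGsplit [w0] rest).1).length + 1 + (pvJ (pvGsplit [w0] rest).2).length := by
          rw [hsJ]; simp; omega
        obtain ⟨T, hT⟩ : ∃ T, pvJ (pvGsplit [w0] rest).2 = w' ++ T := by
          rw [hP2]
          cases r'' with
          | nil => exact ⟨[], by simp [pvJ_single]⟩
          | cons a b => exact ⟨' ' :: pvJ (a :: b), rfl⟩
        have hhit : (pvJ (w0 :: rest))[(pvJ (pvGsplit [w0] rest).1).length]? = some ' ' := by
          rw [hsJ, List.getElem?_append_right (le_refl _)]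
          simp
        have hmax : ∀ i, (pvJ (pvGsplit [w0] rest).1).length < i → i ≤ 70 →
            (List.take 70 (pvJ (w0 :: rest)))[i]? ≠ some ' ' := by
          intro i hji hik
          by_cases hi70 : i < 70
          · rw [List.getElem?_take, if_pos hi70]
            rw [hsJ, List.getElem?_append_right (by omega)]
            have hidx : i - (pvJ (pvGsplit [w0] rest).1).length = (i - (pvJ (pvGsplit [w0] rest).1).length - 1) + 1 := by
              omega
            rw [hidx]
            simp only [List.getElem?_cons_succ]
            have hq : i - (pvJ (pvGsplit [w0] rest).1).length - 1 < w'.length := by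
              rw [pvJlen_def] at hbd'
              omega
            rw [hT, List.getElem?_append_left hq, List.getElem?_eq_getElem hq]
            intro hcc
            have hcc' : w'[i - (pvJ (pvGsplit [w0] rest).1).length - 1] = ' ' := by injection hcc
            have hsp := hw'.2.2 _ (List.getElem_mem hq)
            rw [hcc'] at hsp
            exact absurd hsp (by decide)
          · rw [List.getElem?_eq_none]
            · simp
            · rw [List.length_take]
              omega
        have hgo : PySem.Chars.rfind (List.take 70 (pvJ (w0 :: rest))) [' '] =
            ((pvJ (pvGsplit [w0] rest).1).length : Int) := by
          have hlt : (List.take 70 (pvJ (w0 :: rest))).length = 70 := by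
            rw [List.length_take]
            omega
          unfold PySem.Chars.rfind
          rw [hlt]
          apply pvGo_eq_of_hit
          · omega
          · rw [List.getElem?_take, if_pos (by omega)]
            exact hhit
          · exact hmax
        have hrf : PySem.Chars.rfindFrom (pvJ (w0 :: rest)) [' '] 0 (some 70) =
            ((pvJ (pvGsplit [w0] rest).1).length : Int) := by
          rw [PySem.Chars.rfindFrom]
          have h1 : ¬ (((pvJ (w0 :: rest)).length : Int) < 70) := by push_cast; omega
          simp only [h1, if_false]
          norm_num
          have h702 : (70 : Int).toNat = 70 := rfl
          rw [h702, hgo]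
          rw [if_neg (by omega)]
        have hslice1 : PySem.Chars.slice (pvJ (w0 :: rest)) none
            (some ((pvJ (pvGsplit [w0] rest).1).length : Int)) = pvJ (pvGsplit [w0] rest).1 := by
          rw [PySem.Chars.slice_eq_listSlice, PySem.List.slice_to_natCast, hsJ]
          exact List.take_left
        have hdrop : PySem.Chars.slice (pvJ (w0 :: rest)) (some ((pvJ (pvGsplit [w0] rest).1).length : Int)) none =
            ' ' :: pvJ (pvGsplit [w0] rest).2 := by
          rw [PySem.Chars.slice_eq_listSlice, PySem.List.slice_from_natCast, hsJ]
          exact List.drop_left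
        have hslice2 : PySem.Chars.lstrip (PySem.Chars.slice (pvJ (w0 :: rest))
            (some ((pvJ (pvGsplit [w0] rest).1).length : Int)) none) = pvJ (pvGsplit [w0] rest).2 := by
          rw [hdrop]
          simp only [PySem.Chars.lstrip, List.dropWhile_cons]
          rw [if_pos (by decide)]
          obtain ⟨c0', w'', hw'c⟩ : ∃ c0' w'', w' = c0' :: w'' := by
            cases hc : w' with
            | nil => exact absurd hc hw'.1
            | cons a b => exact ⟨a, b, rfl⟩
          rw [hT, hw'c, List.cons_append, List.dropWhile_cons]
          have hns := hw'.2.2 c0' (by rw [hw'c]; simp)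
          rw [hns]
          simp [← hT, hw'c]
        have hstep : pvWrapA (n + 1) (pvJ (w0 :: rest)) =
            PySem.Chars.slice (pvJ (w0 :: rest)) none (some ((pvJ (pvGsplit [w0] rest).1).length : Int)) ::
              pvWrapA n (PySem.Chars.lstrip (PySem.Chars.slice (pvJ (w0 :: rest))
                (some ((pvJ (pvGsplit [w0] rest).1).length : Int)) none)) := by
          simp only [pvWrapA]
          rw [if_pos (by push_cast; omega)]
          rw [hrf]
          rw [if_neg (by omega)]
        rw [hstep, hslice1, hslice2]
        have hih : pvWrapA n (pvJ (pvGsplit [w0] rest).2) = pvGlines (pvGsplit [w0] rest).2 := by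
          apply ih
          · omega
          · intro w hw
            exact hgood' w (List.mem_append_right _ hw)
        rw [hih]
        simp only [pvGlines]
        rw [if_pos (by rw [pvJlen_def]; exact h70)]
    · rw [pvWrapA]
      rw [if_neg (by push_cast; omega)]
      cases ws with
      | nil => simp [pvJ, pvGlines]
      | cons w0 rest =>
        rw [if_pos (pvJ_ne_nil w0 rest (hg w0 (by simp)).1)]
        simp only [pvGlines]
        rw [if_neg (by rw [pvJlen_def]; omega)]

-- B's inner token-counting loop agrees with the prefix-building split
theorem pvBsplit_eq_gsplit : ∀ (rest cw pre : List (List Char)), cw ≠ [] →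
    pvBsplit (pre ++ cw ++ rest) (pvJlen cw) (pre.length + cw.length) =
      (pre.length + (pvGsplit cw rest).1.length, pvJlen (pvGsplit cw rest).1) := by
  intro rest
  induction rest with
  | nil =>
    intro cw pre hcw
    rw [pvBsplit.eq_def]
    simp only [pvGsplit]
    split
    · rename_i w h
      obtain ⟨hlt, -⟩ := List.getElem?_eq_some_iff.mp h
      simp at hlt
    · rfl
  | cons w rest ih =>
    intro cw pre hcw
    rw [pvBsplit.eq_def]
    have hget : (pre ++ cw ++ (w :: rest))[pre.length + cw.length]? = some w := by
      have hl : (pre ++ cw).length = pre.length + cw.length := by simp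
      rw [← hl, List.getElem?_append_right (le_refl _)]
      simp
    rw [hget]
    simp only [pvGsplit]
    by_cases hcond : pvJlen cw + 1 + w.length ≤ 69
    · rw [if_pos hcond, if_pos hcond]
      have hre : pre ++ cw ++ (w :: rest) = pre ++ (cw ++ [w]) ++ rest := by simp
      have hlen : pvJlen cw + 1 + w.length = pvJlen (cw ++ [w]) := (pvJlen_append_single cw w hcw).symm
      have hct : pre.length + cw.length + 1 = pre.length + (cw ++ [w]).length := by
        simp
        omega
      rw [hre, hlen, hct]
      exact ih (cw ++ [w]) pre (by simp)
    · rw [if_neg hcond, if_neg hcond]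

-- the initial `remaining`: total token length plus separators equals the joined length
theorem pvSum_eq : ∀ ws : List (List Char), ws ≠ [] →
    (ws.map List.length).sum + ws.length = pvJlen ws + 1 := by
  intro ws
  induction ws with
  | nil => intro h; exact absurd rfl h
  | cons w ws ih =>
    intro _
    cases ws with
    | nil => simp [pvJlen_single]
    | cons b t =>
      have := ih (by simp)
      rw [pvJlen_cons w (b :: t) (by simp)]
      simp only [List.map_cons, List.sum_cons, List.length_cons] at this ⊢
      omega

-- B's outer loop computes the greedy word wrap of the unprocessed suffix
theorem pvBwrap_eq_glines : ∀ (fuel : Nat) (words : List (List Char)) (i : Nat),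
    i ≤ words.length → words.drop i ≠ [] → words.length - i < fuel →
    (∀ w ∈ words, pvGood w) →
    pvBwrap fuel words i ((pvJlen (words.drop i) : Int)) = pvGlines (words.drop i) := by
  intro fuel
  induction fuel with
  | zero => intro words i _ _ h; omega
  | succ fuel ih =>
    intro words i hi hne hlen hg
    obtain ⟨w0, rest, hsfx⟩ : ∃ w0 rest, words.drop i = w0 :: rest := by
      cases hc : words.drop i with
      | nil => exact absurd hc hne
      | cons a b => exact ⟨a, b, rfl⟩
    have hgs : ∀ w ∈ words.drop i, pvGood w := fun w hw => hg w (List.mem_of_mem_drop hw)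
    have hw0 : pvGood w0 := hgs w0 (by rw [hsfx]; simp)
    rw [pvBwrap]
    by_cases h70 : 70 < pvJlen (words.drop i)
    · rw [if_pos (by exact_mod_cast h70)]
      have hget : words[i]? = some w0 := by
        have h0 : (words.drop i)[0]? = some w0 := by rw [hsfx]; rfl
        rw [List.getElem?_drop] at h0
        simpa using h0
      rw [hget]
      dsimp only
      obtain ⟨heq0, hne1, h69, _⟩ := pvGsplit_spec rest [w0] (by simp)
        (by rw [pvJlen_single]; have := hw0.2.1; omega)
      have heq : (pvGsplit [w0] rest).1 ++ (pvGsplit [w0] rest).2 = w0 :: rest := by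
        simpa using heq0
      have hwords : (words.take i) ++ [w0] ++ rest = words := by
        conv_rhs => rw [← List.take_append_drop i words]
        rw [hsfx, List.append_assoc]
        rfl
      have hpre : (words.take i).length = i := by
        rw [List.length_take]
        omega
      have hsplit : pvBsplit words w0.length (i + 1) =
          (i + (pvGsplit [w0] rest).1.length, pvJlen (pvGsplit [w0] rest).1) := by
        have := pvBsplit_eq_gsplit rest [w0] (words.take i) (by simp)
        rw [hwords, hpre] at this
        simpa [pvJlen_single] using this
      rw [hsplit]
      simp only
      have htake : (words.drop i).take (i + (pvGsplit [w0] rest).1.length - i) = (pvGsplit [w0] rest).1 := by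
        rw [hsfx, ← heq]
        have he2 : i + (pvGsplit [w0] rest).1.length - i = (pvGsplit [w0] rest).1.length := by omega
        rw [he2]
        exact List.take_left
      rw [htake]
      have hrest' : (pvGsplit [w0] rest).2 ≠ [] := by
        intro hnil
        rw [hnil, List.append_nil] at heq
        have h1 : pvJlen (w0 :: rest) ≤ 69 := by rw [← heq]; exact h69
        rw [hsfx] at h70
        omega
      have hJsplit : pvJlen (words.drop i) =
          pvJlen (pvGsplit [w0] rest).1 + 1 + pvJlen (pvGsplit [w0] rest).2 := by
        rw [hsfx, ← heq]
        exact pvJlen_append _ _ hne1 hrest'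
      have hrem : ((pvJlen (words.drop i) : Int)) - ((pvJlen (pvGsplit [w0] rest).1 : Nat) : Int) - 1 =
          ((pvJlen (pvGsplit [w0] rest).2 : Int)) := by
        rw [hJsplit]
        push_cast
        ring
      rw [hrem]
      have hlenP : (pvGsplit [w0] rest).1.length + (pvGsplit [w0] rest).2.length = rest.length + 1 := by
        have := congrArg List.length heq
        simpa using this
      have hlendrop : rest.length + 1 = words.length - i := by
        have := List.length_drop (l := words) (i := i)
        rw [hsfx] at this
        simp at this
        omega
      have hP1pos : 1 ≤ (pvGsplit [w0] rest).1.length := by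
        cases hc : (pvGsplit [w0] rest).1 with
        | nil => exact absurd hc hne1
        | cons a b => simp
      have hdrop : words.drop (i + (pvGsplit [w0] rest).1.length) = (pvGsplit [w0] rest).2 := by
        have hdd : (words.drop i).drop ((pvGsplit [w0] rest).1.length) =
            words.drop (i + (pvGsplit [w0] rest).1.length) := by
          rw [List.drop_drop]
          try rw [Nat.add_comm]
        rw [← hdd, hsfx, ← heq]
        exact List.drop_left
      have hrec := ih words (i + (pvGsplit [w0] rest).1.length) (by omega)
        (by rw [hdrop]; exact hrest') (by omega) hg
      rw [hdrop] at hrec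
      rw [hrec, pvJoin_eq_pvJ]
      rw [hsfx]
      simp only [pvGlines]
      rw [if_pos (by rw [← hsfx]; exact h70)]
    · rw [if_neg (by exact_mod_cast h70)]
      rw [hsfx]
      simp only [pvGlines]
      rw [if_neg (by rw [← hsfx]; exact h70), ← hsfx, pvJoin_eq_pvJ]

theorem pvToDigitsCore_ne_nil : ∀ (f n : Nat) (ds : List Char), ds ≠ [] →
    Nat.toDigitsCore 10 f n ds ≠ [] := by
  intro f
  induction f with
  | zero => intro n ds h; simpa [Nat.toDigitsCore]
  | succ f ih =>
    intro n ds h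
    rw [Nat.toDigitsCore]
    split
    · simp
    · exact ih _ _ (by simp)

theorem pvToDigits_ne_nil (n : Nat) : Nat.toDigits 10 n ≠ [] := by
  rw [Nat.toDigits, Nat.toDigitsCore]
  split
  · simp
  · exact pvToDigitsCore_ne_nil _ _ _ (by simp)

theorem pvToDigitsCore_mem : ∀ (f n : Nat) (ds : List Char) (c : Char),
    c ∈ Nat.toDigitsCore 10 f n ds → c ∈ ds ∨ ∃ m, c = Nat.digitChar m := by
  intro f
  induction f with
  | zero => intro n ds c h; left; simpa [Nat.toDigitsCore] using h
  | succ f ih =>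
    intro n ds c h
    rw [Nat.toDigitsCore] at h
    split at h
    · rcases List.mem_cons.mp h with h | h
      · right; exact ⟨n % 10, h⟩
      · left; exact h
    · rcases ih _ _ _ h with h' | h'
      · rcases List.mem_cons.mp h' with h'' | h''
        · right; exact ⟨n % 10, h''⟩
        · left; exact h''
      · right; exact h'

theorem pvIsspace_digitChar (m : Nat) : PySem.Chars.isspace (Nat.digitChar m) = false := by
  rcases Nat.lt_or_ge m 16 with h | h
  · interval_cases m <;> rfl
  · have hstar : Nat.digitChar m = '*' := by
      rw [Nat.digitChar]
      rw [if_neg (by omega), if_neg (by omega), if_neg (by omega), if_neg (by omega),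
        if_neg (by omega), if_neg (by omega), if_neg (by omega), if_neg (by omega),
        if_neg (by omega), if_neg (by omega), if_neg (by omega), if_neg (by omega),
        if_neg (by omega), if_neg (by omega), if_neg (by omega), if_neg (by omega)]
    rw [hstar]
    rfl

theorem pvGood_toDigits (n : Nat) (h : n ≤ 126) : pvGood (Nat.toDigits 10 n) := by
  refine ⟨pvToDigits_ne_nil n, ?_, ?_⟩
  · have := Nat.toDigits_length 10 n 3 (by norm_num) (by omega)
    omega
  · intro c hc
    rcases pvToDigitsCore_mem _ _ _ _ hc with h' | ⟨m, hm⟩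
    · simp at h'
    · rw [hm]
      exact pvIsspace_digitChar m

theorem pvGood_TR : pvGood ['T', 'R'] := by
  refine ⟨by simp, by simp, ?_⟩
  intro c hc
  rcases List.mem_cons.mp hc with h | h
  · subst h; rfl
  · have h2 := List.mem_singleton.mp h
    subst h2
    rfl

theorem pvGood_TC : pvGood ['T', 'C'] := by
  refine ⟨by simp, by simp, ?_⟩
  intro c hc
  rcases List.mem_cons.mp hc with h | h
  · subst h; rfl
  · have h2 := List.mem_singleton.mp h
    subst h2
    rfl

-- the words built from a ≤126-coded request are good
theorem pvWords_good (req : List Char) (h : ∀ c ∈ req, c.toNat ≤ 126) :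
    ∀ w ∈ (['T', 'R'] :: req.flatMap (fun ch => [PySem.Int.toChars (pvOrd ch), ['T', 'C']])), pvGood w := by
  intro w hw
  rcases List.mem_cons.mp hw with hm0 | hm0
  · subst hm0
    exact pvGood_TR
  · rcases List.mem_flatMap.mp hm0 with ⟨ch, hch, hm⟩
    rcases List.mem_cons.mp hm with h' | h'
    · subst h'
      have he : PySem.Int.toChars (pvOrd ch) = Nat.toDigits 10 ch.toNat := by
        rw [PySem.Int.toChars, pvOrd]
        rw [if_neg (by simp [Int.ofNat_eq_natCast])]
        simp
      rw [he]
      exact pvGood_toDigits ch.toNat (h ch hch)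
    · rcases List.mem_cons.mp h' with h'' | h''
      · subst h''
        exact pvGood_TC
      · simp at h''

theorem pvLe {a b : Nat} (h : Nat.ble a b = true) : a ≤ b := Nat.le_of_ble_eq_true h

theorem pvDictItems_prop (Q : String × String → Prop) :
    ∀ (pairs : List (String × String)) (d : PySem.Dict String String),
      (∀ kv ∈ d.items, Q kv) → (∀ kv ∈ pairs, Q kv) →
      ∀ kv ∈ (pairs.foldl (fun d kv => PySem.Dict.insert d kv.1 kv.2) d).items, Q kv := by
  intro pairs
  induction pairs with
  | nil => intro d hd _ kv hkv; exact hd kv hkv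
  | cons p pairs ih =>
    intro d hd hp kv hkv
    simp only [List.foldl_cons] at hkv
    refine ih (PySem.Dict.insert d p.1 p.2) ?_ (fun q hq => hp q (List.mem_cons_of_mem _ hq)) kv hkv
    intro q hq
    by_cases hc : d.contains p.1
    · rw [PySem.Dict.insert, if_pos hc] at hq
      simp only [PySem.Dict.items] at hq
      rcases List.mem_map.mp hq with ⟨r, hr, hr2⟩
      by_cases hb : r.1 == p.1
      · rw [if_pos hb] at hr2
        rw [← hr2]
        exact hp (p.1, p.2) (by simp)
      · rw [if_neg hb] at hr2
        rw [← hr2]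
        exact hd r hr
    · rw [PySem.Dict.insert, if_neg hc] at hq
      simp only [PySem.Dict.items] at hq
      rcases List.mem_append.mp hq with h1 | h1
      · exact hd q h1
      · have hq2 : q = (p.1, p.2) := by simpa using h1
        rw [hq2]
        exact hp (p.1, p.2) (by simp)

theorem pvFold_all (P : Char → Prop) (items : List (String × String))
    (h : ∀ kv ∈ items, (∀ c ∈ kv.1.toList, P c) ∧ (∀ c ∈ kv.2.toList, P c))
    (hcolon : P ':') (hsp : P ' ') (hcr : P '\r') (hnl : P '\n') :
    ∀ (r : List Char), (∀ c ∈ r, P c) →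
    ∀ c ∈ items.foldl (fun r kv => r ++ kv.1.toList ++ [':', ' '] ++ kv.2.toList ++ ['\r', '\n']) r, P c := by
  induction items with
  | nil => intro r hr c hc; exact hr c hc
  | cons kv items ih =>
    intro r hr c hc
    simp only [List.foldl_cons] at hc
    refine ih (fun x hx => h x (List.mem_cons_of_mem _ hx)) _ ?_ c hc
    intro c' hc'
    rcases List.mem_append.mp hc' with h1 | h1
    · rcases List.mem_append.mp h1 with h2 | h2
      · rcases List.mem_append.mp h2 with h3 | h3
        · rcases List.mem_append.mp h3 with h4 | h4
          · exact hr c' h4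
          · exact (h kv (by simp)).1 c' h4
        · rcases List.mem_cons.mp h3 with h4 | h4
          · rw [h4]; exact hcolon
          · have h5 : c' = ' ' := List.mem_singleton.mp h4
            rw [h5]; exact hsp
      · exact (h kv (by simp)).2 c' h2
    · rcases List.mem_cons.mp h1 with h2 | h2
      · rw [h2]; exact hcr
      · have h5 : c' = '\n' := List.mem_singleton.mp h2
        rw [h5]; exact hnl

theorem pvAsciiStr_le126 (s : String) (h : pvDomStr s = true) : ∀ c ∈ s.toList, c.toNat ≤ 126 := by
  intro c hc
  rw [pvDomStr, List.all_eq_true] at h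
  have := h c hc
  rw [pvDomChar] at this
  simp only [Bool.or_eq_true, Bool.and_eq_true, decide_eq_true_eq, beq_iff_eq] at this
  omega

theorem pvReq_le126 (method path : String) (headers : Option (List (String × String))) (body : String)
    (hd : Dom_http_request method path headers body) :
    ∀ c ∈ pvReq method path headers body, c.toNat ≤ 126 := by
  rw [Dom_http_request] at hd
  simp only [Bool.and_eq_true] at hd
  obtain ⟨⟨⟨hm, hp⟩, hh⟩, hb⟩ := hd
  have hhdr : ∀ kv ∈ (headers.getD []), pvDomStr kv.1 = true ∧ pvDomStr kv.2 = true := by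
    cases headers with
    | none => simp
    | some hs =>
      simp only [Option.map_some, Option.getD_some] at hh ⊢
      rw [List.all_eq_true] at hh
      intro kv hkv
      have := hh kv hkv
      simp only [Bool.and_eq_true] at this
      exact this
  have hitems : ∀ kv ∈ ((headers.getD []).foldl
      (fun d kv => PySem.Dict.insert d kv.1 kv.2) (PySem.Dict.empty (κ := String) (ν := String))).items,
      (∀ c ∈ kv.1.toList, c.toNat ≤ 126) ∧ (∀ c ∈ kv.2.toList, c.toNat ≤ 126) :=
    pvDictItems_prop
      (fun kv => (∀ c ∈ kv.1.toList, c.toNat ≤ 126) ∧ (∀ c ∈ kv.2.toList, c.toNat ≤ 126))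
      (headers.getD []) PySem.Dict.empty (by intro kv h; simp [PySem.Dict.empty, PySem.Dict.items] at h)
      (fun kv h => ⟨pvAsciiStr_le126 _ (hhdr kv h).1, pvAsciiStr_le126 _ (hhdr kv h).2⟩)
  have hbase : ∀ c ∈ method.toList ++ [' '] ++ path.toList ++
      ([' ', 'H', 'T', 'T', 'P', '/', '1', '.', '1', '\r', '\n'] : List Char), c.toNat ≤ 126 := by
    intro c hc
    rcases List.mem_append.mp hc with h1 | h1
    · rcases List.mem_append.mp h1 with h2 | h2
      · rcases List.mem_append.mp h2 with h3 | h3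
        · exact pvAsciiStr_le126 method hm c h3
        · have h5 : c = ' ' := List.mem_singleton.mp h3
          rw [h5]; exact pvLe rfl
      · exact pvAsciiStr_le126 path hp c h2
    · have hlit : ∀ x ∈ ([' ', 'H', 'T', 'T', 'P', '/', '1', '.', '1', '\r', '\n'] : List Char),
          x.toNat ≤ 126 := by
        simp only [List.forall_mem_cons, and_true]
        exact ⟨pvLe rfl, pvLe rfl, pvLe rfl, pvLe rfl, pvLe rfl, pvLe rfl, pvLe rfl, pvLe rfl,
          pvLe rfl, pvLe rfl, pvLe rfl, by simp⟩
      exact hlit c h1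
  intro c hc
  simp only [pvReq] at hc
  rcases List.mem_append.mp hc with h1 | h1
  · rcases List.mem_append.mp h1 with h2 | h2
    · exact pvFold_all (fun c => c.toNat ≤ 126) _ hitems (pvLe rfl) (pvLe rfl) (pvLe rfl) (pvLe rfl)
        _ hbase c h2
    · rcases List.mem_cons.mp h2 with h3 | h3
      · rw [h3]; exact pvLe rfl
      · have h5 : c = '\n' := List.mem_singleton.mp h3
        rw [h5]; exact pvLe rfl
  · exact pvAsciiStr_le126 body hb c h1

-- ===== VERDICT (by name: the statement is the Claim_ definition above) =====
theorem http_request_spec : Claim_equal_http_request := by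
  intro method path headers body hd
  unfold Spec_http_request http_request http_request_alt pvTstr
  simp only []
  set req := pvReq method path headers body with hreq
  have hc : ∀ c ∈ req, c.toNat ≤ 126 := pvReq_le126 method path headers body hd
  set words : List (List Char) := ['T', 'R'] :: req.flatMap (fun ch => [PySem.Int.toChars (pvOrd ch), ['T', 'C']]) with hwords
  have hgood : ∀ w ∈ words, pvGood w := pvWords_good req hc
  have hfull : PySem.Chars.join [' ']
      (['T', 'R'] :: req.map (fun ch => PySem.Int.toChars (pvOrd ch) ++ [' ', 'T', 'C'])) = pvJ words := by
    rw [pvJoin_eq_pvJ, hwords]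
    apply pvJ_cons_congr
    · simpa using pvTokens_join req []
    · cases req <;> simp
  rw [hfull]
  have hA : pvWrapA ((pvJ words).length + 1) (pvJ words) = pvGlines words :=
    pvWrapA_eq_glines ((pvJ words).length + 1) words (by omega) hgood
  rw [hA]
  have hrem0 : ((words.map List.length).sum : Int) + (words.length : Int) - 1 = ((pvJlen words : Nat) : Int) := by
    have h1 := pvSum_eq words (by rw [hwords]; simp)
    have h2 : ((words.map List.length).sum : Int) + (words.length : Int) = (pvJlen words : Int) + 1 := by
      exact_mod_cast congrArg (Nat.cast (R := Int)) h1
    omega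
  rw [hrem0]
  have hB : pvBwrap (words.length + 1) words 0 ((pvJlen words : Int)) = pvGlines words := by
    have := pvBwrap_eq_glines (words.length + 1) words 0 (by omega) (by rw [List.drop_zero, hwords]; simp) (by omega) hgood
    simpa using this
  rw [hB]
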